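-- pv_equiv track=rewrite | github.com/tedsheppard/qbcc-site | services/claim_check/rule_engine.py | _combine_components
-- ===== SOURCE A (Python) =====
-- def _combine_components(components: list[tuple[str, str, str, str]]) -> tuple[str, str, str, str]:
--     """Combine multiple component results into one. Priority: input > fail > warning > pass.
--
--     Returns (status, explanation, quote, reasoning_trace).
--     """
--     priority = {"input": 4, "fail": 3, "warning": 2, "pass": 1}
--     winner = max(components, key=lambda c: priority.get(c[0], 0))
--     status = winner[0]
--     explanations = [c[1] for c in components if c[1]]
--     quote = next((c[2] for c in components if c[2]), "")
--     traces = [c[3] for c in components if len(c) > 3 and c[3]]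
--     seen: set[str] = set()
--     uniq_e = []
--     for e in explanations:
--         if e in seen:
--             continue
--         seen.add(e)
--         uniq_e.append(e)
--     seen_t: set[str] = set()
--     uniq_t = []
--     for t in traces:
--         if t in seen_t:
--             continue
--         seen_t.add(t)
--         uniq_t.append(t)
--     reasoning = "\n\n".join(uniq_t)
--     return status, " ".join(uniq_e), quote, reasoning
-- ===== SOURCE B (Python) =====
-- def _combine_components(components: list[tuple[str, str, str, str]]) -> tuple[str, str, str, str]:
--     """Single fused pass: running best-priority status, first nonempty quote,
--     and order-preserving dedup of explanations/traces, all in one loop."""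
--     if not components:
--         raise ValueError("max() iterable argument is empty")
--     priority = {"input": 4, "fail": 3, "warning": 2, "pass": 1}
--     best_status, best_priority = "", -1
--     quote = ""
--     seen_e, uniq_e = set(), []
--     seen_t, uniq_t = set(), []
--     for c in components:
--         p = priority.get(c[0], 0)
--         if p > best_priority:
--             best_status, best_priority = c[0], p
--         if not quote and c[2]:
--             quote = c[2]
--         if c[1] and c[1] not in seen_e:
--             seen_e.add(c[1])
--             uniq_e.append(c[1])
--         if c[3] and c[3] not in seen_t:
--             seen_t.add(c[3])
--             uniq_t.append(c[3])
--     return best_status, " ".join(uniq_e), quote, "\n\n".join(uniq_t)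
-- ===== Notes on version B (the rewrite author's own statement) =====
-- stated objective: alternative
-- what changed: Replaced max(key=...) plus four separate passes (two comprehensions, a next(), two dedup loops) with one fused loop that maintains the running best-priority status, the first nonempty quote, and two order-preserving dedup accumulators.
import Mathlib
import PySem

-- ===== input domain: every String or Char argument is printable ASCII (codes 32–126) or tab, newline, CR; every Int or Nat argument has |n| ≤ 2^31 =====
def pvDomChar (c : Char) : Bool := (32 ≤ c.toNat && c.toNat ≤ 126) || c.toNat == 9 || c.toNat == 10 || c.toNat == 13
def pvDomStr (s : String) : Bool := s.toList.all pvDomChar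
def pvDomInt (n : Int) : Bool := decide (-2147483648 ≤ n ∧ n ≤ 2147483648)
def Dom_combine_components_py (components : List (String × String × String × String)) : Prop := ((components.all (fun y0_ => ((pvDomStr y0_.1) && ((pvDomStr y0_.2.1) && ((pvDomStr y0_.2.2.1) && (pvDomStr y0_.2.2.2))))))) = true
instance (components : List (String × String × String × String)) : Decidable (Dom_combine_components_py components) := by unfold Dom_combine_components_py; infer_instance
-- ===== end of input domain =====

-- B fuses A's max()+four separate passes into one loop with running best/quote/dedup state (alternative decomposition, same cost).
-- Pre_ excludes the empty list, on which A (via max) and B both raise ValueError.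


-- ===== PORT A =====
-- priority.get(c[0], 0)
def pvPrio (s : String) : Int :=
  if s = "input" then 4 else if s = "fail" then 3 else if s = "warning" then 2
  else if s = "pass" then 1 else 0

-- A's dedup loop over a list of strings: seen set + uniq list
def pvDedupStep (st : PySem.Set String × List String) (e : String) :
    PySem.Set String × List String :=
  if st.1.contains e then st else (st.1.add e, st.2 ++ [e])

def combine_components_py (components : List (String × String × String × String)) :
    String × String × String × String :=
  match PySem.List.max? components (fun c => pvPrio c.1) with
  | none => ("", "", "", "")   -- Python raises ValueError on empty components; excluded by Pre_
  | some winner =>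
    let status := winner.1
    let explanations := (components.filter (fun c => c.2.1 != "")).map (fun c => c.2.1)
    let quote := (((components.find? (fun c => c.2.2.1 != "")).map (fun c => c.2.2.1)).getD "")
    -- len(c) > 3 is always true for a 4-tuple, so only the truthiness test remains
    let traces := (components.filter (fun c => c.2.2.2 != "")).map (fun c => c.2.2.2)
    let uniq_e := (explanations.foldl pvDedupStep (PySem.Set.empty, [])).2
    let uniq_t := (traces.foldl pvDedupStep (PySem.Set.empty, [])).2
    (status, PySem.Str.join " " uniq_e, quote, PySem.Str.join "\n\n" uniq_t)

-- ===== PORT B =====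
-- the four independent updates of B's loop body
def pvBestStep (s : String × Int) (c : String × String × String × String) : String × Int :=
  if pvPrio c.1 > s.2 then (c.1, pvPrio c.1) else s

def pvQuoteStep (q : String) (c : String × String × String × String) : String :=
  if q == "" && c.2.2.1 != "" then c.2.2.1 else q

def pvEStep (st : PySem.Set String × List String) (c : String × String × String × String) :
    PySem.Set String × List String :=
  if c.2.1 != "" && !(st.1.contains c.2.1) then (st.1.add c.2.1, st.2 ++ [c.2.1]) else st

def pvTStep (st : PySem.Set String × List String) (c : String × String × String × String) :
    PySem.Set String × List String :=
  if c.2.2.2 != "" && !(st.1.contains c.2.2.2) then (st.1.add c.2.2.2, st.2 ++ [c.2.2.2]) else st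

def pvBStep
    (s : (String × Int) × String × (PySem.Set String × List String) × (PySem.Set String × List String))
    (c : String × String × String × String) :
    (String × Int) × String × (PySem.Set String × List String) × (PySem.Set String × List String) :=
  (pvBestStep s.1 c, pvQuoteStep s.2.1 c, pvEStep s.2.2.1 c, pvTStep s.2.2.2 c)

def combine_components_py_alt (components : List (String × String × String × String)) :
    String × String × String × String :=
  let s := components.foldl pvBStep (("", -1), "", (PySem.Set.empty, []), (PySem.Set.empty, []))
  (s.1.1, PySem.Str.join " " s.2.2.1.2, s.2.1, PySem.Str.join "\n\n" s.2.2.2.2)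

-- ===== PRECONDITION & SPEC =====
-- Pre_ excludes only the empty list, where A's max raises ValueError (B raises it too)
def Pre_combine_components_py (components : List (String × String × String × String)) : Prop :=
  components ≠ []
instance (components : List (String × String × String × String)) : Decidable (Pre_combine_components_py components) := by unfold Pre_combine_components_py; infer_instance

def pvWitness_combine_components_py : (List (String × String × String × String)) :=
  [("pass", "ok", "q", "t")]

def Spec_combine_components_py (components : List (String × String × String × String)) (out : String × String × String × String) : Prop := out = combine_components_py_alt components
instance (components : List (String × String × String × String)) (out : String × String × String × String) : Decidable (Spec_combine_components_py components out) := by unfold Spec_combine_components_py; infer_instance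

-- ===== CLAIM (what is proved, stated in full; the proofs are below) =====
def Claim_equal_combine_components_py : Prop := ∀ (components : List (String × String × String × String)), Dom_combine_components_py components → Pre_combine_components_py components → Spec_combine_components_py components (combine_components_py components)

-- ===== LEMMAS AND PROOFS =====

-- B's fused fold is the tuple of its four independent folds
theorem pvBStep_split (l : List (String × String × String × String))
    (s : (String × Int) × String × (PySem.Set String × List String) × (PySem.Set String × List String)) :
    l.foldl pvBStep s =
      (l.foldl pvBestStep s.1, l.foldl pvQuoteStep s.2.1,
       l.foldl pvEStep s.2.2.1, l.foldl pvTStep s.2.2.2) := by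
  induction l generalizing s with
  | nil => rfl
  | cons c t ih => simp only [List.foldl_cons]; rw [ih]; rfl

def pvPick (m c : String × String × String × String) : String × String × String × String :=
  if pvPrio m.1 < pvPrio c.1 then c else m

-- A's max? on a nonempty list is a plain running-max fold (first winner kept)
theorem pvMax_cons (c : String × String × String × String)
    (t : List (String × String × String × String)) :
    PySem.List.max? (c :: t) (fun x => pvPrio x.1) = some (t.foldl pvPick c) := by
  induction t generalizing c with
  | nil => rfl
  | cons d t ih =>
    have h1 : PySem.List.max? (c :: d :: t) (fun x => pvPrio x.1)
        = PySem.List.max? (pvPick c d :: t) (fun x => pvPrio x.1) := by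
      unfold PySem.List.max?
      simp only [List.foldl_cons]
      congr 1
      unfold pvPick; split <;> rfl
    rw [h1, ih]
    rfl

-- B's (status, priority) fold tracks A's running max winner
theorem pvBestFold (t : List (String × String × String × String))
    (m : String × String × String × String) :
    t.foldl pvBestStep (m.1, pvPrio m.1) = ((t.foldl pvPick m).1, pvPrio (t.foldl pvPick m).1) := by
  induction t generalizing m with
  | nil => rfl
  | cons c t ih =>
    simp only [List.foldl_cons, pvBestStep, pvPick]
    by_cases h : pvPrio m.1 < pvPrio c.1
    · simp only [if_pos h]
      exact ih c
    · simp only [if_neg h]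
      exact ih m

theorem pvPrio_nonneg (s : String) : 0 ≤ pvPrio s := by
  unfold pvPrio; split_ifs <;> omega

-- B's quote fold, once nonempty, is frozen
theorem pvQuoteFrozen (t : List (String × String × String × String)) (q : String) (h : q ≠ "") :
    t.foldl pvQuoteStep q = q := by
  induction t with
  | nil => rfl
  | cons c t ih =>
    simp only [List.foldl_cons, pvQuoteStep]
    rw [if_neg (by simp [h]), ih]

-- B's quote fold from "" computes A's next(...)
theorem pvQuoteFold (l : List (String × String × String × String)) :
    l.foldl pvQuoteStep "" =
      (((l.find? (fun c => c.2.2.1 != "")).map (fun c => c.2.2.1)).getD "") := by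
  induction l with
  | nil => rfl
  | cons c t ih =>
    rw [List.foldl_cons, List.find?_cons]
    by_cases h : c.2.2.1 = ""
    · have hb : (c.2.2.1 != "") = false := by simp [h]
      have hq : pvQuoteStep "" c = "" := by unfold pvQuoteStep; rw [hb]; simp
      rw [hb, hq]; simpa using ih
    · have hb : (c.2.2.1 != "") = true := by simp [h]
      have hq : pvQuoteStep "" c = c.2.2.1 := by unfold pvQuoteStep; rw [hb]; simp
      rw [hb, hq, pvQuoteFrozen t _ h]; simp

-- B's truthy-guarded dedup step is A's dedup step when the field is nonempty
theorem pvEStep_eq (st : PySem.Set String × List String)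
    (c : String × String × String × String) :
    pvEStep st c = if c.2.1 != "" then pvDedupStep st c.2.1 else st := by
  unfold pvEStep pvDedupStep
  cases hb : c.2.1 != "" <;> cases hc : st.1.contains c.2.1 <;> simp

theorem pvTStep_eq (st : PySem.Set String × List String)
    (c : String × String × String × String) :
    pvTStep st c = if c.2.2.2 != "" then pvDedupStep st c.2.2.2 else st := by
  unfold pvTStep pvDedupStep
  cases hb : c.2.2.2 != "" <;> cases hc : st.1.contains c.2.2.2 <;> simp

-- B's fused truthy-dedup fold on explanations equals A's dedup of the filtered map
theorem pvEFold (l : List (String × String × String × String))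
    (st : PySem.Set String × List String) :
    l.foldl pvEStep st =
      (((l.filter (fun c => c.2.1 != "")).map (fun c => c.2.1)).foldl pvDedupStep st) := by
  induction l generalizing st with
  | nil => rfl
  | cons c t ih =>
    simp only [List.foldl_cons, pvEStep_eq]
    by_cases h : c.2.1 = ""
    · rw [if_neg (by simp [h]), List.filter_cons_of_neg (by simp [h]), ih]
    · rw [if_pos (by simp [h]), List.filter_cons_of_pos (by simp [h])]
      simp only [List.map_cons, List.foldl_cons]
      exact ih _

-- same for traces
theorem pvTFold (l : List (String × String × String × String))
    (st : PySem.Set String × List String) :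
    l.foldl pvTStep st =
      (((l.filter (fun c => c.2.2.2 != "")).map (fun c => c.2.2.2)).foldl pvDedupStep st) := by
  induction l generalizing st with
  | nil => rfl
  | cons c t ih =>
    simp only [List.foldl_cons, pvTStep_eq]
    by_cases h : c.2.2.2 = ""
    · rw [if_neg (by simp [h]), List.filter_cons_of_neg (by simp [h]), ih]
    · rw [if_pos (by simp [h]), List.filter_cons_of_pos (by simp [h])]
      simp only [List.map_cons, List.foldl_cons]
      exact ih _

-- ===== VERDICT (by name: the statement is the Claim_ definition above) =====
theorem combine_components_py_spec : Claim_equal_combine_components_py := by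
  intro components _ hpre
  unfold Spec_combine_components_py
  cases components with
  | nil => exact absurd rfl hpre
  | cons c t =>
    unfold combine_components_py combine_components_py_alt
    rw [pvMax_cons]
    simp only [pvBStep_split]
    rw [pvEFold, pvTFold, pvQuoteFold]
    have hbest : (List.foldl pvBestStep ("", -1) (c :: t)).1 = (t.foldl pvPick c).1 := by
      rw [List.foldl_cons]
      have h1 : pvBestStep ("", -1) c = (c.1, pvPrio c.1) := by
        unfold pvBestStep; rw [if_pos (by have := pvPrio_nonneg c.1; omega)]
      rw [h1, pvBestFold]
    rw [hbest]
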